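-- pv_equiv track=rewrite | github.com/ExplorerDonutz/Comp-Sci-1026-Archive | Assign3/univRanking.py | capitalUniversities
-- ===== SOURCE A (Python) =====
-- def capitalUniversities(rankReader, capital):
--     unis = []
--     info = f"The capital is => {capital.upper()}\n"
--     for row in rankReader:
--         # If the university contains the capital, add it to the list
--         if capital in row[1]:
--             unis.append(row[1])
--
--     info += "The universities that contain the capital name =>\n"
--
--     # Use i for numbering and add all capital universities to the info string
--     for i in range(len(unis)):
--         info += f"#{i + 1} {unis[i].upper()}\n"
--
--     return info
-- ===== SOURCE B (Python) =====
-- def capitalUniversities(rankReader, capital):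
--     # Recursive decomposition: build the listing tail back-to-front, carrying the next number.
--     def go(rows, k):
--         if not rows:
--             return ""
--         name = rows[0][1]
--         if capital in name:
--             return f"#{k} {name.upper()}\n" + go(rows[1:], k + 1)
--         return go(rows[1:], k)
--     return (f"The capital is => {capital.upper()}\n"
--             "The universities that contain the capital name =>\n"
--             + go(rankReader, 1))
-- ===== Notes on version B (the rewrite author's own statement) =====
-- stated objective: alternative
-- what changed: Replaced A's two staged passes (collect a unis list, then an index loop over range(len(unis)) with repeated concatenation) by a single recursive helper that consumes the rows structurally, carries the next number, and builds the output tail back-to-front with no intermediate list.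
import Mathlib
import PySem

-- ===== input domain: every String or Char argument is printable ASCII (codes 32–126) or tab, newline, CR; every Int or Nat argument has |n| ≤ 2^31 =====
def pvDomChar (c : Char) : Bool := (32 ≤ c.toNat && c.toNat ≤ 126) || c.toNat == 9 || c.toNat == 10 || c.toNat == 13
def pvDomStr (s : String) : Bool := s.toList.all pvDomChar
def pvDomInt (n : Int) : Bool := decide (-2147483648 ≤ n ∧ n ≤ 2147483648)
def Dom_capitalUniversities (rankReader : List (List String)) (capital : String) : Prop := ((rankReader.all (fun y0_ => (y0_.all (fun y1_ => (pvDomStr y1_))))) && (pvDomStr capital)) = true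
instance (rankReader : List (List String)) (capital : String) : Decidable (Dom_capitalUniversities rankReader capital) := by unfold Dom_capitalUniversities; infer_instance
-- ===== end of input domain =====

-- B replaces A's two staged passes (collect list, then index loop) by one structural recursion
-- carrying the next number (objective: alternative decomposition, same cost).

-- ===== PORT A =====
-- A: first pass collects row[1] for matching rows; second pass numbers them by index.
def capitalUniversities (rankReader : List (List String)) (capital : String) : String :=
  let unis : List String := rankReader.foldl (fun unis row =>
    if PySem.Str.isIn capital (PySem.List.pyGetD row 1 "") then
      unis ++ [PySem.List.pyGetD row 1 ""] else unis) []
  let info := "The capital is => " ++ PySem.Str.upper capital ++ "\n"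
  let info := info ++ "The universities that contain the capital name =>\n"
  (PySem.List.pyRange 0 (unis.length : Int) 1).foldl (fun info i =>
    info ++ "#" ++ PySem.Int.toStr (i + 1) ++ " " ++ PySem.Str.upper (PySem.List.pyGetD unis i "") ++ "\n") info

-- ===== PORT B =====
-- B's recursive helper go(rows, k)
def capitalUniversitiesGo (capital : String) (rows : List (List String)) (k : Int) : String :=
  match rows with
  | [] => ""
  | row :: rest =>
    let name := PySem.List.pyGetD row 1 ""
    if PySem.Str.isIn capital name then
      "#" ++ PySem.Int.toStr k ++ " " ++ PySem.Str.upper name ++ "\n" ++ capitalUniversitiesGo capital rest (k + 1)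
    else capitalUniversitiesGo capital rest k

def capitalUniversities_alt (rankReader : List (List String)) (capital : String) : String :=
  "The capital is => " ++ PySem.Str.upper capital ++ "\n" ++
  "The universities that contain the capital name =>\n" ++
  capitalUniversitiesGo capital rankReader 1

-- ===== PRECONDITION & SPEC =====
-- Pre_ excludes rows with fewer than 2 fields: there row[1] raises IndexError in A (and in B).
def Pre_capitalUniversities (rankReader : List (List String)) (capital : String) : Prop :=
  ∀ row ∈ rankReader, 2 ≤ row.length
instance (rankReader : List (List String)) (capital : String) : Decidable (Pre_capitalUniversities rankReader capital) := by unfold Pre_capitalUniversities; infer_instance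

def pvWitness_capitalUniversities : List (List String) × String :=
  ([["1", "Uni Paris"], ["2", "London School"]], "Paris")

def Spec_capitalUniversities (rankReader : List (List String)) (capital : String) (out : String) : Prop := out = capitalUniversities_alt rankReader capital
instance (rankReader : List (List String)) (capital : String) (out : String) : Decidable (Spec_capitalUniversities rankReader capital out) := by unfold Spec_capitalUniversities; infer_instance

-- ===== CLAIM (what is proved, stated in full; the proofs are below) =====
def Claim_equal_capitalUniversities : Prop := ∀ (rankReader : List (List String)) (capital : String), Dom_capitalUniversities rankReader capital → Pre_capitalUniversities rankReader capital → Spec_capitalUniversities rankReader capital (capitalUniversities rankReader capital)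

-- ===== LEMMAS AND PROOFS =====

-- the filtered list of names A collects
def pvNames (capital : String) (rows : List (List String)) : List String :=
  (rows.map (fun row => PySem.List.pyGetD row 1 "")).filter (fun n => PySem.Str.isIn capital n)

-- the rendering B's recursion produces, on the name list
def pvRender (us : List String) (k : Int) : String :=
  match us with
  | [] => ""
  | n :: ns => "#" ++ PySem.Int.toStr k ++ " " ++ PySem.Str.upper n ++ "\n" ++ pvRender ns (k + 1)

theorem pvGo_eq_render (capital : String) (rows : List (List String)) :
    ∀ k, capitalUniversitiesGo capital rows k = pvRender (pvNames capital rows) k := by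
  induction rows with
  | nil => intro k; rfl
  | cons row rest ih =>
    intro k
    simp only [capitalUniversitiesGo, pvNames, List.map_cons, List.filter_cons]
    simp only [PySem.Str.isIn] at ih ⊢
    by_cases h : PySem.Chars.isIn capital.toList (PySem.List.pyGetD row 1 "").toList = true
    · simp [h, pvRender, ih, pvNames, PySem.Str.isIn]
    · simp [h, ih, pvNames, PySem.Str.isIn]

theorem pvUnis_eq_names (capital : String) (rows : List (List String)) :
    ∀ acc, rows.foldl (fun unis row =>
      if PySem.Str.isIn capital (PySem.List.pyGetD row 1 "") then
        unis ++ [PySem.List.pyGetD row 1 ""] else unis) acc = acc ++ pvNames capital rows := by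
  induction rows with
  | nil => intro acc; simp [pvNames]
  | cons row rest ih =>
    intro acc
    simp only [List.foldl_cons, pvNames, List.map_cons, List.filter_cons]
    simp only [PySem.Str.isIn] at ih ⊢
    by_cases h : PySem.Chars.isIn capital.toList (PySem.List.pyGetD row 1 "").toList = true
    · simp [h, ih, pvNames, PySem.Str.isIn]
    · simp [h, ih, pvNames, PySem.Str.isIn]

theorem pvLoop2 (us : List String) :
    ∀ (m j : Nat) (s : String), j + m = us.length →
    (PySem.List.pyRange (j : Int) (us.length : Int) 1).foldl (fun info i =>
        info ++ "#" ++ PySem.Int.toStr (i + 1) ++ " " ++ PySem.Str.upper (PySem.List.pyGetD us i "") ++ "\n") s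
      = s ++ pvRender (us.drop j) ((j : Int) + 1) := by
  intro m
  induction m with
  | zero =>
    intro j s h
    rw [PySem.List.pyRange_one_eq_nil (by omega)]
    have hd : us.drop j = [] := List.drop_eq_nil_of_le (by omega)
    simp [hd, pvRender]
  | succ n ih =>
    intro j s h
    have hj : j < us.length := by omega
    rw [PySem.List.pyRange_one_cons (by omega)]
    rw [List.foldl_cons]
    have hcast : ((j : Int) + 1) = ((j + 1 : Nat) : Int) := by push_cast; ring
    rw [hcast]
    rw [ih (j + 1) _ (by omega)]
    have hdrop : us.drop j = us[j] :: us.drop (j + 1) := List.drop_eq_getElem_cons hj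
    have hget : PySem.List.pyGetD us ((j : Nat) : Int) "" = us[j] := by
      rw [PySem.List.pyGetD_natCast]; exact List.getD_eq_getElem us "" hj
    rw [hdrop]
    simp only [pvRender, hget]
    push_cast
    simp [String.append_assoc]

-- ===== VERDICT (by name: the statement is the Claim_ definition above) =====
theorem capitalUniversities_spec : Claim_equal_capitalUniversities := by
  intro rankReader capital _ _
  unfold Spec_capitalUniversities capitalUniversities capitalUniversities_alt
  rw [pvUnis_eq_names capital rankReader []]
  rw [List.nil_append]
  have h0 : ((0 : Int)) = ((0 : Nat) : Int) := by norm_num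
  rw [h0, pvLoop2 (pvNames capital rankReader) (pvNames capital rankReader).length 0 _ (by omega)]
  rw [pvGo_eq_render capital rankReader 1]
  simp [String.append_assoc]
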